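-- pv_equiv track=rewrite | github.com/tinverse/hoopsense | tools/review/labeller/generate_layer1_annotations.py | _track_frame_counts
-- ===== SOURCE A (Python) =====
-- def _track_frame_counts(frames):
--     counts = {}
--     for frame in frames:
--         seen = set()
--         for detection in frame.get("detections", []):
--             track_id = detection.get("track_id")
--             if track_id is None or track_id in seen:
--                 continue
--             counts[track_id] = counts.get(track_id, 0) + 1
--             seen.add(track_id)
--     return counts
-- ===== SOURCE B (Python) =====
-- def _track_frame_counts(frames):
--     pairs = []
--     for index, frame in enumerate(frames):
--         for detection in frame.get("detections", []):
--             track_id = detection.get("track_id")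
--             if track_id is not None:
--                 pairs.append((index, track_id))
--     counts = {}
--     for _, track_id in dict.fromkeys(pairs):
--         counts[track_id] = counts.get(track_id, 0) + 1
--     return counts
-- ===== Notes on version B (the rewrite author's own statement) =====
-- stated objective: alternative
-- what changed: Replaces A's online per-frame seen-set plus running counter with a staged pipeline: flatten all (frame_index, track_id) pairs into one list, deduplicate it with dict.fromkeys, then count track_ids over the deduplicated pairs.
import Mathlib
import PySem

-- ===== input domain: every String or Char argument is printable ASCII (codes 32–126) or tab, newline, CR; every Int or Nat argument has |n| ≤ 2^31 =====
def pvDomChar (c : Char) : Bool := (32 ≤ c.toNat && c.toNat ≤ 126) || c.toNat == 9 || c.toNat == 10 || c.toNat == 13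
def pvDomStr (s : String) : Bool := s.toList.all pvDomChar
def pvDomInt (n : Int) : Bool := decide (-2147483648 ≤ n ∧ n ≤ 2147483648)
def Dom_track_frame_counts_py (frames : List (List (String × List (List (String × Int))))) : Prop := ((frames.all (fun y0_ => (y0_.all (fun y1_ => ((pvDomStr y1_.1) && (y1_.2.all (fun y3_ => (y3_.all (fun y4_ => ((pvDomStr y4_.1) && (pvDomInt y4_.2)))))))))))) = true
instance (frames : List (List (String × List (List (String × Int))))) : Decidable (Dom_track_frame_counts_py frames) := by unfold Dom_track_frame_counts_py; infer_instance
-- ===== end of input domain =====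

-- B replaces A's online per-frame seen-set + running counter with a staged pipeline:
-- flatten all (frame_index, track_id) pairs, dedupe with dict.fromkeys, then count
-- (objective: alternative; same asymptotic cost).

-- ===== PORT A =====
-- one detection of A's inner loop: skip a missing track_id or one already seen this frame,
-- else bump the running counter and mark it seen
def pvStepA (st : PySem.Dict Int Int × PySem.Set Int) (detection : List (String × Int)) :
    PySem.Dict Int Int × PySem.Set Int :=
  match (PySem.Dict.mk detection).get? "track_id" with
  | none => st
  | some tid =>
    if PySem.Set.contains st.2 tid then st
    else (st.1.insert tid (st.1.getD tid 0 + 1), PySem.Set.add st.2 tid)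

-- one frame of A's outer loop: fresh 'seen' set, fold over frame.get("detections", [])
def pvFrameA (counts : PySem.Dict Int Int) (frame : List (String × List (List (String × Int)))) :
    PySem.Dict Int Int :=
  (((PySem.Dict.mk frame).getD "detections" []).foldl pvStepA (counts, PySem.Set.empty)).1

def track_frame_counts_py (frames : List (List (String × List (List (String × Int))))) : List (Int × Int) :=
  (frames.foldl pvFrameA PySem.Dict.empty).items

-- ===== PORT B =====
-- phase 1, inner append: pairs.append((index, track_id)) for a present track_id
def pvCollectDet (i : Int) (ps : List (Int × Int)) (detection : List (String × Int)) :
    List (Int × Int) :=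
  match (PySem.Dict.mk detection).get? "track_id" with
  | none => ps
  | some tid => ps ++ [(i, tid)]

-- phase 1, one enumerated frame
def pvCollectFrame (ps : List (Int × Int)) (pr : Int × List (String × List (List (String × Int)))) :
    List (Int × Int) :=
  ((PySem.Dict.mk pr.2).getD "detections" []).foldl (pvCollectDet pr.1) ps

-- phase 3: the counting loop 'counts[t] = counts.get(t, 0) + 1' over a pair list
def pvCountPairs (l : List (Int × Int)) : PySem.Dict Int Int :=
  l.foldl (fun c p => c.insert p.2 (c.getD p.2 0 + 1)) PySem.Dict.empty

def track_frame_counts_py_alt (frames : List (List (String × List (List (String × Int))))) : List (Int × Int) :=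
  (pvCountPairs (PySem.List.dedup ((PySem.List.enumerate frames).foldl pvCollectFrame []))).items

-- ===== PRECONDITION & SPEC =====
def Spec_track_frame_counts_py (frames : List (List (String × List (List (String × Int))))) (out : List (Int × Int)) : Prop := out = track_frame_counts_py_alt frames
instance (frames : List (List (String × List (List (String × Int))))) (out : List (Int × Int)) : Decidable (Spec_track_frame_counts_py frames out) := by unfold Spec_track_frame_counts_py; infer_instance

-- ===== CLAIM (what is proved, stated in full; the proofs are below) =====
def Claim_equal_track_frame_counts_py : Prop := ∀ (frames : List (List (String × List (List (String × Int))))), Dom_track_frame_counts_py frames → Spec_track_frame_counts_py frames (track_frame_counts_py frames)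

-- ===== LEMMAS AND PROOFS =====

-- B's dedup step, fused per detection: what Set.ofList does to the pairs one detection emits
def pvG (i : Int) (S : PySem.Set (Int × Int)) (detection : List (String × Int)) :
    PySem.Set (Int × Int) :=
  match (PySem.Dict.mk detection).get? "track_id" with
  | none => S
  | some tid => PySem.Set.add S (i, tid)

-- folding Set.add over the pairs a detection loop appends = folding pvG over the detections
lemma pv_build_det (i : Int) (dets : List (List (String × Int))) (ps : List (Int × Int))
    (S : PySem.Set (Int × Int)) :
    List.foldl PySem.Set.add S (dets.foldl (pvCollectDet i) ps)
      = dets.foldl (pvG i) (List.foldl PySem.Set.add S ps) := by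
  induction dets generalizing ps with
  | nil => rfl
  | cons d rest ih =>
    simp only [List.foldl_cons]
    rw [ih]
    congr 1
    unfold pvCollectDet pvG
    cases (PySem.Dict.mk d).get? "track_id" with
    | none => rfl
    | some tid => rw [List.foldl_append]; rfl

-- the same, lifted over the enumerated outer loop
lemma pv_build_all (frames : List (List (String × List (List (String × Int))))) (i : Int)
    (ps : List (Int × Int)) (S : PySem.Set (Int × Int)) :
    List.foldl PySem.Set.add S ((PySem.List.enumerate frames i).foldl pvCollectFrame ps)
      = (PySem.List.enumerate frames i).foldl
          (fun S pr => ((PySem.Dict.mk pr.2).getD "detections" []).foldl (pvG pr.1) S)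
          (List.foldl PySem.Set.add S ps) := by
  induction frames generalizing i ps with
  | nil => rfl
  | cons a rest ih =>
    rw [PySem.List.enumerate_cons]
    simp only [List.foldl_cons]
    rw [ih]
    congr 1
    exact pv_build_det i _ ps S

-- coupling invariant inside frame i: A's counter is the pair-count of the dedup set S so far,
-- 'seen' is exactly "(i, ·) ∈ S", and S holds no index beyond i
def pvInv (i : Int) (counts : PySem.Dict Int Int) (seen : PySem.Set Int)
    (S : PySem.Set (Int × Int)) : Prop :=
  counts = pvCountPairs S ∧ (∀ t : Int, t ∈ seen ↔ (i, t) ∈ S) ∧ (∀ p ∈ S, p.1 ≤ i)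

lemma pvStep_inv (i : Int) (counts : PySem.Dict Int Int) (seen : PySem.Set Int)
    (S : PySem.Set (Int × Int)) (d : List (String × Int)) (h : pvInv i counts seen S) :
    pvInv i (pvStepA (counts, seen) d).1 (pvStepA (counts, seen) d).2 (pvG i S d) := by
  obtain ⟨h1, h2, h3⟩ := h
  unfold pvStepA pvG
  cases hd : (PySem.Dict.mk d).get? "track_id" with
  | none => exact ⟨h1, h2, h3⟩
  | some tid =>
    simp only
    by_cases hseen : tid ∈ seen
    · rw [if_pos ((PySem.Set.contains_iff seen tid).mpr hseen)]
      rw [PySem.Set.add_of_mem ((h2 tid).mp hseen)]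
      exact ⟨h1, h2, h3⟩
    · rw [if_neg (fun hc => hseen ((PySem.Set.contains_iff seen tid).mp hc))]
      have hnm : (i, tid) ∉ S := fun hm => hseen ((h2 tid).mpr hm)
      rw [PySem.Set.add_of_not_mem hnm]
      refine ⟨?_, ?_, ?_⟩
      · show counts.insert tid (counts.getD tid 0 + 1) = pvCountPairs (S ++ [(i, tid)])
        unfold pvCountPairs
        rw [List.foldl_append, h1]
        rfl
      · intro t
        rw [PySem.Set.mem_add, List.mem_append, List.mem_singleton]
        constructor
        · rintro (hm | rfl)
          · exact Or.inl ((h2 t).mp hm)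
          · exact Or.inr rfl
        · rintro (hm | he)
          · exact Or.inl ((h2 t).mpr hm)
          · exact Or.inr (congrArg Prod.snd he)
      · intro p hp
        rcases List.mem_append.mp hp with hp | hp
        · exact h3 p hp
        · rw [List.mem_singleton] at hp; subst hp; exact le_refl i

lemma pvInner_inv (i : Int) (dets : List (List (String × Int)))
    (st : PySem.Dict Int Int × PySem.Set Int) (S : PySem.Set (Int × Int))
    (h : pvInv i st.1 st.2 S) :
    pvInv i (dets.foldl pvStepA st).1 (dets.foldl pvStepA st).2 (dets.foldl (pvG i) S) := by
  induction dets generalizing st S with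
  | nil => exact h
  | cons d rest ih =>
    simp only [List.foldl_cons]
    exact ih _ _ (pvStep_inv i st.1 st.2 S d h)

-- outer invariant across frames: counter = pair-count of S, all indices in S are < the next frame
lemma pvOuter (frames : List (List (String × List (List (String × Int))))) (i : Int)
    (counts : PySem.Dict Int Int) (S : PySem.Set (Int × Int))
    (h1 : counts = pvCountPairs S) (h2 : ∀ p ∈ S, p.1 < i) :
    frames.foldl pvFrameA counts
      = pvCountPairs ((PySem.List.enumerate frames i).foldl
          (fun S pr => ((PySem.Dict.mk pr.2).getD "detections" []).foldl (pvG pr.1) S) S) := by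
  induction frames generalizing i counts S with
  | nil => simpa [PySem.List.enumerate_nil] using h1
  | cons a rest ih =>
    rw [PySem.List.enumerate_cons]
    simp only [List.foldl_cons]
    have hinv : pvInv i counts PySem.Set.empty S := by
      refine ⟨h1, ?_, fun p hp => le_of_lt (h2 p hp)⟩
      intro t
      constructor
      · intro hm; exact absurd hm List.not_mem_nil
      · intro hm; exact absurd (h2 _ hm) (lt_irrefl i)
    have hres := pvInner_inv i ((PySem.Dict.mk a).getD "detections" []) (counts, PySem.Set.empty) S hinv
    obtain ⟨g1, _, g3⟩ := hres
    exact ih (i + 1) _ _ g1 (fun p hp => by have := g3 p hp; omega)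

-- ===== VERDICT (by name: the statement is the Claim_ definition above) =====
theorem track_frame_counts_py_spec : Claim_equal_track_frame_counts_py := by
  intro frames _
  unfold Spec_track_frame_counts_py track_frame_counts_py track_frame_counts_py_alt
  rw [PySem.List.dedup_eq_ofList, PySem.Set.ofList_eq_foldl, pv_build_all frames 0 [] []]
  rw [pvOuter frames 0 PySem.Dict.empty [] rfl (fun p hp => absurd hp List.not_mem_nil)]
  rfl
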